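-- pv_equiv track=rewrite | github.com/PNNL-CompBio/coderdata | build/beatAML/GetBeatAML.py | remove_sixth_from_last_quote
-- ===== SOURCE A (Python) =====
-- def remove_sixth_from_last_quote(s):
--     """
--     Modify an incorrectly formatted file.
--     """
--     reversed_s = s[::-1]  # Reverse the string
--     count = 0
--     index_to_remove = None
--     for i, char in enumerate(reversed_s):
--         if char == '"':
--             count += 1
--         if count == 6:
--             index_to_remove = i
--             break
--     # Remove the 6th occurrence of the quote character
--     if index_to_remove is not None:
--         reversed_s = reversed_s[:index_to_remove] + reversed_s[index_to_remove+1:]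
--     return reversed_s[::-1]  # Reverse again to obtain the original order
-- ===== SOURCE B (Python) =====
-- def remove_sixth_from_last_quote(s):
--     positions = [i for i, c in enumerate(s) if c == '"']
--     if len(positions) < 6:
--         return s
--     p = positions[-6]
--     return s[:p] + s[p+1:]
-- ===== Notes on version B (the rewrite author's own statement) =====
-- stated objective: simpler
-- what changed: B drops the double string reversal and the count-with-break scan: it builds the list of quote positions in one forward pass and, when there are at least six, splices the string once at positions[-6].
import Mathlib
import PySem

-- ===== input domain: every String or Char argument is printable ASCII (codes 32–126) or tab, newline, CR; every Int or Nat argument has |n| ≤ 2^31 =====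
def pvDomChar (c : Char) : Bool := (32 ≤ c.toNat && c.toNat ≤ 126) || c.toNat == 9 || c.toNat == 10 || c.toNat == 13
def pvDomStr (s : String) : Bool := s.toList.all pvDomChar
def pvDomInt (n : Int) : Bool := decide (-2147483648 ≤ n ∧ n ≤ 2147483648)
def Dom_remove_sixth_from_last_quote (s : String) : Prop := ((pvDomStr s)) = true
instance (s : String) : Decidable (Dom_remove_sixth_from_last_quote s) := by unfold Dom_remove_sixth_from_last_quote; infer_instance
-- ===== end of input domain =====

-- B replaces A's reverse / count-with-break / reverse-back with a quote-index table and one direct splice; objective: simpler.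

-- ===== PORT A =====
-- A's 'for i, char in enumerate(reversed_s): …' loop with count and break:
def pvFindA : List Char → Nat → Nat → Option Nat
  | [], _, _ => none
  | c :: cs, count, i =>
      let count' := if c == '"' then count + 1 else count
      if count' == 6 then some i else pvFindA cs count' (i + 1)

def remove_sixth_from_last_quote (s : String) : String :=
  let reversed := s.toList.reverse                  -- s[::-1] (PySem.List.slice?_none_none_neg_one)
  match pvFindA reversed 0 0 with
  | some i =>
      String.ofList ((PySem.List.slice reversed none (some (i : Int)) ++
                      PySem.List.slice reversed (some ((i + 1 : Nat) : Int)) none).reverse)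
  | none => String.ofList reversed.reverse

-- ===== PORT B =====
def remove_sixth_from_last_quote_alt (s : String) : String :=
  let positions := ((PySem.List.enumerate s.toList).filter (fun p => p.2 == '"')).map (·.1)
  if positions.length < 6 then s
  else
    let p := PySem.List.pyGetD positions (-6) 0    -- positions[-6]; in range by the length test
    String.ofList (PySem.List.slice s.toList none (some p) ++
                   PySem.List.slice s.toList (some (p + 1)) none)

-- ===== PRECONDITION & SPEC =====
def Spec_remove_sixth_from_last_quote (s : String) (out : String) : Prop := out = remove_sixth_from_last_quote_alt s
instance (s : String) (out : String) : Decidable (Spec_remove_sixth_from_last_quote s out) := by unfold Spec_remove_sixth_from_last_quote; infer_instance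

-- ===== CLAIM (what is proved, stated in full; the proofs are below) =====
def Claim_equal_remove_sixth_from_last_quote : Prop := ∀ (s : String), Dom_remove_sixth_from_last_quote s → Spec_remove_sixth_from_last_quote s (remove_sixth_from_last_quote s)

-- ===== LEMMAS AND PROOFS =====

-- the list of indices of '"' in a list of chars (proof-side reference)
def pvIdxs : List Char → List Nat
  | [] => []
  | c :: cs => if c == '"' then 0 :: (pvIdxs cs).map (· + 1) else (pvIdxs cs).map (· + 1)

theorem pvIdxs_lt (l : List Char) : ∀ q ∈ pvIdxs l, q < l.length := by
  induction l with
  | nil => simp [pvIdxs]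
  | cons c cs ih =>
    intro q hq
    simp only [pvIdxs] at hq
    split at hq
    · rcases List.mem_cons.mp hq with rfl | hq
      · simp
      · obtain ⟨r, hr, rfl⟩ := List.mem_map.mp hq
        exact Nat.succ_lt_succ (ih r hr)
    · obtain ⟨r, hr, rfl⟩ := List.mem_map.mp hq
      exact Nat.succ_lt_succ (ih r hr)

theorem pvIdxs_append (a b : List Char) :
    pvIdxs (a ++ b) = pvIdxs a ++ (pvIdxs b).map (· + a.length) := by
  induction a with
  | nil => simp [pvIdxs]
  | cons c cs ih =>
    have h : ((pvIdxs b).map (· + cs.length)).map (· + 1)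
        = (pvIdxs b).map (· + (c :: cs).length) := by
      rw [List.map_map]
      exact List.map_congr_left (fun q _ => by simp [Function.comp]; omega)
    simp only [List.cons_append, pvIdxs, ih, List.map_append, h]
    split <;> simp

theorem pvIdxs_reverse (l : List Char) :
    pvIdxs l.reverse = ((pvIdxs l).reverse).map (fun q => l.length - 1 - q) := by
  induction l with
  | nil => simp [pvIdxs]
  | cons c cs ih =>
    rw [List.reverse_cons, pvIdxs_append, ih]
    simp only [pvIdxs]
    split
    · simp; exact fun a _ => by omega
    · simp; exact fun a _ => by omega

theorem pvFindA_eq (l : List Char) : ∀ (c i : Nat), c < 6 →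
    pvFindA l c i = ((pvIdxs l)[5 - c]?).map (· + i) := by
  induction l with
  | nil => intro c i hc; simp [pvFindA, pvIdxs]
  | cons x xs ih =>
    intro c i hc
    simp only [pvFindA, pvIdxs]
    by_cases hx : x == '"'
    · simp only [hx, if_true]
      by_cases h6 : c + 1 = 6
      · have hc5 : c = 5 := by omega
        subst hc5
        simp [h6]
      · have h5 : 5 - c = (4 - c) + 1 := by omega
        rw [if_neg (by simpa using h6), ih (c + 1) (i + 1) (by omega), h5]
        simp [List.getElem?_cons_succ, List.getElem?_map, Option.map_map]
        cases (pvIdxs xs)[4 - c]?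
        · simp
        · simp; omega
    · simp only [Bool.not_eq_true] at hx
      simp only [hx, Bool.false_eq_true, if_false]
      rw [if_neg (by simp; omega), ih c (i + 1) (by omega)]
      simp only [List.getElem?_map, Option.map_map]
      cases (pvIdxs xs)[5 - c]?
      · simp
      · simp; omega

theorem pvPositions (l : List Char) : ∀ (k : Int),
    ((PySem.List.enumerate l k).filter (fun p => p.2 == '"')).map (·.1)
      = (pvIdxs l).map (fun (q : Nat) => k + (q : Int)) := by
  induction l with
  | nil => intro k; simp [pvIdxs, PySem.List.enumerate]
  | cons x xs ih =>
    intro k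
    rw [PySem.List.enumerate_cons]
    simp only [List.filter_cons, pvIdxs]
    by_cases hx : x == '"'
    · simp only [hx, if_true, List.map_cons, ih (k + 1), List.map_map]
      refine List.cons_eq_cons.mpr ⟨by simp, ?_⟩
      exact List.map_congr_left (fun q _ => by simp only [Function.comp_apply]; push_cast; ring)
    · simp only [Bool.not_eq_true] at hx
      simp only [hx, Bool.false_eq_true, if_false, ih (k + 1), List.map_map]
      exact List.map_congr_left (fun q _ => by simp only [Function.comp_apply]; push_cast; ring)

-- removing index (n-1-p) from the reversed list and reversing back = removing index p
theorem erase_rev (l : List Char) (p : Nat) (hp : p < l.length) :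
    (l.reverse.take (l.length - 1 - p) ++ l.reverse.drop (l.length - 1 - p + 1)).reverse
      = l.take p ++ l.drop (p + 1) := by
  rw [List.reverse_append, List.reverse_drop, List.reverse_take]
  simp only [List.reverse_reverse, List.length_reverse]
  congr 1 <;> congr 1 <;> omega

theorem pv_main (s : String) :
    remove_sixth_from_last_quote s = remove_sixth_from_last_quote_alt s := by
  unfold remove_sixth_from_last_quote remove_sixth_from_last_quote_alt
  simp only [pvPositions s.toList 0, List.length_map]
  have hfind := pvFindA_eq s.toList.reverse 0 0 (by omega)
  rw [pvIdxs_reverse] at hfind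
  by_cases h6 : (pvIdxs s.toList).length < 6
  · have : ((pvIdxs s.toList).reverse.map (fun q => s.toList.length - 1 - q))[5]? = none := by
      rw [List.getElem?_eq_none_iff]; simp; omega
    rw [this] at hfind
    simp only [hfind, Option.map_none]
    simp [h6, String.ofList_toList]
  · have h5 : 5 < (pvIdxs s.toList).length := by omega
    set I := pvIdxs s.toList with hI
    set p := I[I.length - 6]'(by omega) with hp
    have hpn : p < s.toList.length := pvIdxs_lt _ _ (List.getElem_mem _)
    have hidx : (I.reverse.map (fun q => s.toList.length - 1 - q))[5]?
        = some (s.toList.length - 1 - p) := by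
      rw [List.getElem?_eq_getElem (by simp; omega)]
      simp only [List.getElem_map, List.getElem_reverse]
      have he : I.length - 1 - 5 = I.length - 6 := by omega
      simp only [he, ← hp]
    rw [hidx] at hfind
    simp only [hfind, Option.map_some, Nat.add_zero]
    rw [if_neg h6]
    have hgd : PySem.List.pyGetD (I.map (fun (q : Nat) => (0 : Int) + (q : Int))) (-6) 0
        = (p : Int) := by
      rw [PySem.List.pyGetD_neg_ofNat _ 6 0 (by omega) (by simp; omega)]
      simp [hp]
    rw [hgd]
    rw [PySem.List.slice_to_natCast, PySem.List.slice_from_natCast]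
    have hc : ((p : Int) + 1) = ((p + 1 : Nat) : Int) := by push_cast; ring
    rw [PySem.List.slice_to_natCast]
    rw [hc, PySem.List.slice_from_natCast]
    congr 1
    exact erase_rev s.toList p hpn

-- ===== VERDICT (by name: the statement is the Claim_ definition above) =====
theorem remove_sixth_from_last_quote_spec : Claim_equal_remove_sixth_from_last_quote := by
  intro s _
  exact pv_main s
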